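-- pv_equiv track=rewrite | github.com/KSneijders/AoE2ScenarioParser | AoE2ScenarioParser/helper/helper.py | pretty_print_list
-- ===== SOURCE A (Python) =====
-- from typing import List, Dict, Union
--
-- _default_inline_types = {
--     'int': 8,
--     'float': 8
-- }
--
-- def pretty_print_list(plist: List, inline_types: Dict[str, int] = None):
--     if len(plist) == 0:
--         return "[]"
--     if inline_types is None:
--         inline_types = _default_inline_types
--     entry_type = type(plist[0]).__name__  # Get entry type
--
--     return_string = "[\r\n"
--     line_items = []
--     for index, entry in enumerate(plist):
--         if entry_type in inline_types.keys():
--             line_items.append(entry)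
--             if index % inline_types[entry_type] == inline_types[entry_type] - 1:
--                 return_string += _create_inline_line(line_items)
--                 line_items = []
--             continue
--         else:
--             return_string += f"\t{entry}\r\n"
--     if len(line_items) != 0:
--         return_string += _create_inline_line(line_items)
--     return return_string + "]\r\n"
--
-- def _create_inline_line(entries):
--     return "\t" + ", ".join(map(str, entries)) + "\r\n"
-- ===== SOURCE B (Python) =====
-- _default_inline_types = {
--     'int': 8,
--     'float': 8
-- }
--
-- def _create_inline_line(entries):
--     return "\t" + ", ".join(map(str, entries)) + "\r\n"
--
-- def pretty_print_list(plist, inline_types=None):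
--     if len(plist) == 0:
--         return "[]"
--     if inline_types is None:
--         inline_types = _default_inline_types
--     n = inline_types.get(type(plist[0]).__name__)
--     if n is None:
--         body = "".join(f"\t{entry}\r\n" for entry in plist)
--     else:
--         body = "".join(_create_inline_line(plist[i:i + n])
--                        for i in range(0, len(plist), n))
--     return "[\r\n" + body + "]\r\n"
-- ===== Notes on version B (the rewrite author's own statement) =====
-- stated objective: simpler
-- what changed: B hoists the constant inline-type lookup out of the loop and replaces A's stateful enumerate/modulo/flush accumulator with a stateless join over fixed-size slices (or a plain per-entry map when the type is not inline).
-- outside the precondition, e.g. on pretty_print_list([1, 2], {'int': -3}): A returns '[\r\n\t1, 2\r\n]\r\n', B returns '[\r\n]\r\n'; on pretty_print_list([1], {'int': 0}): A raises ZeroDivisionError, B raises ValueError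
import Mathlib
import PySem

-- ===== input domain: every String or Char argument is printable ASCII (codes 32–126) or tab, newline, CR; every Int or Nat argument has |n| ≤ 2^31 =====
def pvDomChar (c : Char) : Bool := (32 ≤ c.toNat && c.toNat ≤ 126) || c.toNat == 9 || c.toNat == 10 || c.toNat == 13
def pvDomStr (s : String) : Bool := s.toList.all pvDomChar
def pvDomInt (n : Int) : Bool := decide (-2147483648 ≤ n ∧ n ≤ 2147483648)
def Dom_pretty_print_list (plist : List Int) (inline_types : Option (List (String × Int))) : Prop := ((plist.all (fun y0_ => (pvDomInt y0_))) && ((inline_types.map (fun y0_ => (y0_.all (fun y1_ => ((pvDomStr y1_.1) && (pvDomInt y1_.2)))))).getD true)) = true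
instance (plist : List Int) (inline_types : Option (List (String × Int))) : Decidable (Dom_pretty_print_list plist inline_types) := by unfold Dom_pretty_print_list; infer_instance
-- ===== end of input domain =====

-- B replaces A's stateful enumerate/modulo/flush accumulator by a stateless join over fixed-size
-- slices, with the inline-type lookup hoisted out of the loop (objective: simpler).

-- first-match lookup in the dict's association list ('int' in d.keys() ↔ (pvLookup d "int").isSome;
-- d['int'] with the key present is (pvLookup d "int").getD 0)
def pvLookup (it : List (String × Int)) (k : String) : Option Int :=
  (it.find? (fun q => q.1 == k)).map (fun q => q.2)

-- _create_inline_line (helper of both Pythons)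
def ppl_inline (entries : List Int) : String :=
  "\t" ++ PySem.Str.join ", " (entries.map PySem.Int.toStr) ++ "\r\n"

-- ===== PORT A =====
-- type(plist[0]).__name__ is always "int" here, since plist : List Int
def pretty_print_list (plist : List Int) (inline_types : Option (List (String × Int))) : String :=
  if plist.length == 0 then "[]"
  else
    let it := inline_types.getD [("int", 8), ("float", 8)]
    let entryType := "int"
    let st := (PySem.List.enumerate plist).foldl
      (fun (st : String × List Int) (p : Int × Int) =>
        if (pvLookup it entryType).isSome then
          let items := st.2 ++ [p.2]
          let n := (pvLookup it entryType).getD 0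
          if PySem.Int.mod p.1 n == n - 1 then (st.1 ++ ppl_inline items, []) else (st.1, items)
        else
          (st.1 ++ "\t" ++ PySem.Int.toStr p.2 ++ "\r\n", st.2))
      ("[\r\n", ([] : List Int))
    (if st.2.length ≠ 0 then st.1 ++ ppl_inline st.2 else st.1) ++ "]\r\n"

-- ===== PORT B =====
def pretty_print_list_alt (plist : List Int) (inline_types : Option (List (String × Int))) : String :=
  if plist.length == 0 then "[]"
  else
    let it := inline_types.getD [("int", 8), ("float", 8)]
    let body :=
      match pvLookup it "int" with
      | none => PySem.Str.join "" (plist.map (fun e => "\t" ++ PySem.Int.toStr e ++ "\r\n"))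
      | some n => PySem.Str.join "" ((PySem.List.pyRange 0 plist.length n).map
          (fun i => ppl_inline (PySem.List.slice plist (some i) (some (i + n)))))
    "[\r\n" ++ body ++ "]\r\n"

-- ===== PRECONDITION & SPEC =====
-- Pre_ excludes nonempty lists whose inline chunk size for 'int' is ≤ 0: with size 0 both programs
-- raise (A ZeroDivisionError, B ValueError), and for a negative size A's end-only flush (one big
-- line) is an accident of its index-modulo test while B's range produces no chunks at all.
def Pre_pretty_print_list (plist : List Int) (inline_types : Option (List (String × Int))) : Prop :=
  plist = [] ∨ 1 ≤ (pvLookup (inline_types.getD [("int", 8), ("float", 8)]) "int").getD 1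
instance (plist : List Int) (inline_types : Option (List (String × Int))) : Decidable (Pre_pretty_print_list plist inline_types) := by unfold Pre_pretty_print_list; infer_instance

def pvWitness_pretty_print_list : List Int × (Option (List (String × Int))) := ([1, 2, 3], some [("int", 2)])

def Spec_pretty_print_list (plist : List Int) (inline_types : Option (List (String × Int))) (out : String) : Prop := out = pretty_print_list_alt plist inline_types
instance (plist : List Int) (inline_types : Option (List (String × Int))) (out : String) : Decidable (Spec_pretty_print_list plist inline_types out) := by unfold Spec_pretty_print_list; infer_instance

-- ===== CLAIM (what is proved, stated in full; the proofs are below) =====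
def Claim_equal_pretty_print_list : Prop := ∀ (plist : List Int) (inline_types : Option (List (String × Int))), Dom_pretty_print_list plist inline_types → Pre_pretty_print_list plist inline_types → Spec_pretty_print_list plist inline_types (pretty_print_list plist inline_types)

-- ===== LEMMAS AND PROOFS =====

-- the two shapes A's loop body takes once the (constant) lookup is decided
def stepInline (n : Int) (st : String × List Int) (p : Int × Int) : String × List Int :=
  let items := st.2 ++ [p.2]
  if PySem.Int.mod p.1 n == n - 1 then (st.1 ++ ppl_inline items, []) else (st.1, items)

def stepPlain (st : String × List Int) (p : Int × Int) : String × List Int :=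
  (st.1 ++ "\t" ++ PySem.Int.toStr p.2 ++ "\r\n", st.2)

def postFlush (st : String × List Int) : String :=
  if st.2.length ≠ 0 then st.1 ++ ppl_inline st.2 else st.1

-- reference chunking: m chunks of size N, as a string
def chunks (N : Nat) : Nat → List Int → String
  | 0, _ => ""
  | m + 1, xs => if xs.isEmpty then "" else ppl_inline (xs.take N) ++ chunks N m (xs.drop N)

theorem chunks_nil (N m : Nat) : chunks N m [] = "" := by cases m <;> simp [chunks]

theorem sjoin_nil : PySem.Str.join "" [] = "" := by
  simp [PySem.Str.join, PySem.Chars.join_nil]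

theorem sjoin_cons (c : String) (rest : List String) :
    PySem.Str.join "" (c :: rest) = c ++ PySem.Str.join "" rest := by
  cases rest with
  | nil => simp [PySem.Str.join, PySem.Chars.join_singleton, PySem.Chars.join_nil]
  | cons d rest => simp [PySem.Str.join, PySem.Chars.join_cons_cons]

theorem fmod_cast (a b : Nat) : PySem.Int.mod (a : Int) (b : Int) = ((a % b : Nat) : Int) := by
  simp [PySem.Int.mod, ← Int.ofNat_fmod]

theorem inner_no_flush (N : Nat) (ys : List Int) :
    ∀ (q r : Nat) (items : List Int) (ret : String), r + ys.length ≤ N - 1 →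
    (PySem.List.enumerate ys ((q * N + r : Nat) : Int)).foldl (stepInline (N : Int)) (ret, items)
      = (ret, items ++ ys) := by
  induction ys with
  | nil => intro q r items ret _; simp [PySem.List.enumerate_nil]
  | cons y ys ih =>
    intro q r items ret h
    have hr : r < N - 1 := by simp at h; omega
    rw [PySem.List.enumerate_cons]
    have hm : (q * N + r) % N = r := by
      rw [Nat.mul_comm, Nat.mul_add_mod]; exact Nat.mod_eq_of_lt (by omega)
    have hc : (PySem.Int.mod ((q * N + r : Nat) : Int) (N : Int) == (N : Int) - 1) = false := by
      rw [fmod_cast, hm]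
      simp only [beq_eq_false_iff_ne, ne_eq]
      omega
    simp only [List.foldl_cons, stepInline, hc, Bool.false_eq_true, if_false]
    have hidx : ((q * N + r : Nat) : Int) + 1 = ((q * N + (r + 1) : Nat) : Int) := by push_cast; ring
    rw [hidx, ih q (r + 1) (items ++ [y]) ret (by simp at h ⊢; omega)]
    simp

theorem loopA (N : Nat) (hN : 1 ≤ N) (m : Nat) :
    ∀ (xs : List Int) (q : Nat) (ret : String), xs.length ≤ N * m →
    postFlush ((PySem.List.enumerate xs ((q * N : Nat) : Int)).foldl (stepInline (N : Int)) (ret, []))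
      = ret ++ chunks N m xs := by
  induction m with
  | zero =>
    intro xs q ret h
    have hxs : xs = [] := by simpa using List.length_eq_zero_iff.mp (by omega)
    subst hxs
    simp [PySem.List.enumerate_nil, postFlush, chunks]
  | succ m ih =>
    intro xs q ret h
    rw [Nat.mul_succ] at h
    by_cases hxs : xs = []
    · subst hxs; simp [PySem.List.enumerate_nil, postFlush, chunks_nil]
    · by_cases hlen : xs.length ≤ N - 1
      · -- a final partial chunk: no flush in the loop, flushed after it
        have h0 : ((q * N : Nat) : Int) = ((q * N + 0 : Nat) : Int) := by norm_num
        rw [h0, inner_no_flush N xs q 0 [] ret (by omega)]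
        have htake : xs.take N = xs := List.take_of_length_le (by omega)
        have hdrop : xs.drop N = [] := List.drop_eq_nil_of_le (by omega)
        simp [postFlush, hxs, chunks, htake, hdrop, chunks_nil]
      · -- a full chunk of N elements, flushed at its last element
        have hNle : N ≤ xs.length := by omega
        have hidx : N - 1 < xs.length := by omega
        have hsplit : xs = xs.take (N - 1) ++ (xs[N - 1] :: xs.drop N) := by
          have hN1 : N - 1 + 1 = N := by omega
          conv_lhs => rw [← List.take_append_drop (N - 1) xs]
          rw [List.drop_eq_getElem_cons hidx, hN1]
        conv_lhs => rw [hsplit]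
        rw [PySem.List.enumerate_append]
        rw [List.foldl_append]
        have hlt : (xs.take (N - 1)).length = N - 1 := by
          simp [List.length_take]; omega
        have h0 : ((q * N : Nat) : Int) = ((q * N + 0 : Nat) : Int) := by norm_num
        rw [h0, inner_no_flush N _ q 0 [] ret (by rw [hlt]; omega)]
        rw [PySem.List.enumerate_cons]
        have hstart : ((q * N + 0 : Nat) : Int) + ((xs.take (N - 1)).length : Int)
            = ((q * N + (N - 1) : Nat) : Int) := by rw [hlt]; push_cast; ring
        rw [hstart]
        have hm : (q * N + (N - 1)) % N = N - 1 := by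
          rw [Nat.mul_comm, Nat.mul_add_mod]; exact Nat.mod_eq_of_lt (by omega)
        have hc : (PySem.Int.mod ((q * N + (N - 1) : Nat) : Int) (N : Int) == (N : Int) - 1) = true := by
          rw [fmod_cast, hm]
          simp only [beq_iff_eq]
          omega
        simp only [List.foldl_cons, stepInline, hc, if_true, List.nil_append]
        have hnext : ((q * N + (N - 1) : Nat) : Int) + 1 = (((q + 1) * N : Nat) : Int) := by
          have h2 : q * N + (N - 1) + 1 = (q + 1) * N := by rw [Nat.succ_mul]; omega
          rw [← h2, Nat.cast_add_one]
        rw [hnext]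
        have htakeN : xs.take (N - 1) ++ [xs[N - 1]] = xs.take N := by
          have h1 : xs.take (N - 1 + 1) = xs.take (N - 1) ++ [xs[N - 1]] := by
            rw [List.take_add_one, List.getElem?_eq_getElem hidx]; simp
          rw [← h1]
          congr 1
          omega
        rw [htakeN]
        rw [ih (xs.drop N) (q + 1) (ret ++ ppl_inline (xs.take N))
          (by simp [List.length_drop]; omega)]
        have hne : xs.isEmpty = false := by simpa using hxs
        simp [chunks, hne, String.append_assoc]

theorem loopB (N : Nat) (m : Nat) :
    ∀ (xs : List Int), xs.length ≤ N * m → N * m < xs.length + N →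
    PySem.Str.join "" ((List.range m).map (fun k => ppl_inline ((xs.drop (N * k)).take N)))
      = chunks N m xs := by
  induction m with
  | zero =>
    intro xs _ _
    simp [List.range_zero, sjoin_nil, chunks]
  | succ m ih =>
    intro xs h1 h2
    rw [Nat.mul_succ] at h1 h2
    have hlen0 : 0 < xs.length := by omega
    have hxs : xs.isEmpty = false := by
      rcases xs with _ | _
      · simp at hlen0
      · simp
    rw [List.range_succ_eq_map, List.map_cons, sjoin_cons, List.map_map]
    have hmap : (List.range m).map ((fun k => ppl_inline ((xs.drop (N * k)).take N)) ∘ Nat.succ)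
        = (List.range m).map (fun k => ppl_inline (((xs.drop N).drop (N * k)).take N)) := by
      apply List.map_congr_left
      intro k _
      simp only [Function.comp]
      rw [show (xs.drop N).drop (N * k) = xs.drop (N * Nat.succ k) by
        rw [List.drop_drop]; congr 1; rw [Nat.mul_succ]; omega]
    rw [hmap, ih (xs.drop N) (by rw [List.length_drop]; omega) (by rw [List.length_drop]; omega)]
    simp [chunks, hxs]

theorem loopPlain (xs : List Int) : ∀ (j : Int) (ret : String),
    (PySem.List.enumerate xs j).foldl stepPlain (ret, []) =
      (ret ++ PySem.Str.join "" (xs.map (fun e => "\t" ++ PySem.Int.toStr e ++ "\r\n")), ([] : List Int)) := by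
  induction xs with
  | nil => intro j ret; simp [PySem.List.enumerate_nil, sjoin_nil]
  | cons x xs ih =>
    intro j ret
    rw [PySem.List.enumerate_cons]
    simp only [List.foldl_cons, stepPlain]
    rw [ih, List.map_cons, sjoin_cons]
    simp [String.append_assoc]

theorem foldA_none (o : Option Int) (ho : o = none) :
    (fun (st : String × List Int) (p : Int × Int) =>
      if o.isSome = true then
        if (PySem.Int.mod p.1 (o.getD 0) == o.getD 0 - 1) = true then
          (st.1 ++ ppl_inline (st.2 ++ [p.2]), ([] : List Int))
        else (st.1, st.2 ++ [p.2])
      else (st.1 ++ "\t" ++ PySem.Int.toStr p.2 ++ "\r\n", st.2)) = stepPlain := by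
  funext st p
  simp [ho, stepPlain]

theorem foldA_some (o : Option Int) (n : Int) (ho : o = some n) (hn : 0 ≤ n) :
    (fun (st : String × List Int) (p : Int × Int) =>
      if o.isSome = true then
        if (PySem.Int.mod p.1 (o.getD 0) == o.getD 0 - 1) = true then
          (st.1 ++ ppl_inline (st.2 ++ [p.2]), ([] : List Int))
        else (st.1, st.2 ++ [p.2])
      else (st.1 ++ "\t" ++ PySem.Int.toStr p.2 ++ "\r\n", st.2)) = stepInline ((n.toNat : Nat) : Int) := by
  funext st p
  rw [show ((n.toNat : Nat) : Int) = n from Int.toNat_of_nonneg hn]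
  simp [ho, stepInline]

-- ===== VERDICT (by name: the statement is the Claim_ definition above) =====
theorem pretty_print_list_spec : Claim_equal_pretty_print_list := by
  intro plist inline_types _ hpre
  unfold Spec_pretty_print_list
  by_cases hp : plist.length = 0
  · simp [pretty_print_list, pretty_print_list_alt, hp]
  · have hp' : (plist.length == 0) = false := by simp [hp]
    have hne : plist ≠ [] := by
      intro h; subst h; simp at hp
    cases hl : pvLookup (inline_types.getD [("int", 8), ("float", 8)]) "int" with
    | none =>
      simp only [pretty_print_list, pretty_print_list_alt, hp', Bool.false_eq_true, if_false]
      rw [foldA_none _ hl, loopPlain, hl]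
      simp [String.append_assoc]
    | some n =>
      rcases hpre with h | h
      · exact absurd h hne
      rw [hl] at h
      simp only [Option.getD_some] at h
      have hN1 : 1 ≤ n.toNat := by omega
      have hn : n = (n.toNat : Int) := (Int.toNat_of_nonneg (by omega)).symm
      have hdm := Nat.div_add_mod (plist.length + n.toNat - 1) n.toNat
      have hmod := Nat.mod_lt (plist.length + n.toNat - 1) (show 0 < n.toNat by omega)
      have hub : plist.length ≤ n.toNat * ((plist.length + n.toNat - 1) / n.toNat) := by omega
      have hlb : n.toNat * ((plist.length + n.toNat - 1) / n.toNat) < plist.length + n.toNat := by omega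
      have hA := loopA n.toNat hN1 ((plist.length + n.toNat - 1) / n.toNat) plist 0 "[\r\n" hub
      rw [show ((0 * n.toNat : Nat) : Int) = 0 by simp] at hA
      have hB := loopB n.toNat ((plist.length + n.toNat - 1) / n.toNat) plist hub hlb
      simp only [pretty_print_list, pretty_print_list_alt, hp', Bool.false_eq_true, if_false]
      rw [foldA_some _ n hl (by omega)]
      rw [hl]
      rw [show postFlush (List.foldl (stepInline ((n.toNat : Nat) : Int)) ("[\r\n", ([] : List Int))
            (PySem.List.enumerate plist)) = (if (List.foldl (stepInline ((n.toNat : Nat) : Int)) ("[\r\n", ([] : List Int))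
            (PySem.List.enumerate plist)).2.length ≠ 0 then (List.foldl (stepInline ((n.toNat : Nat) : Int)) ("[\r\n", ([] : List Int))
            (PySem.List.enumerate plist)).1 ++ ppl_inline (List.foldl (stepInline ((n.toNat : Nat) : Int)) ("[\r\n", ([] : List Int))
            (PySem.List.enumerate plist)).2 else (List.foldl (stepInline ((n.toNat : Nat) : Int)) ("[\r\n", ([] : List Int))
            (PySem.List.enumerate plist)).1) from rfl] at hA
      rw [hA]
      show _ = ("[\r\n" ++ PySem.Str.join ""
          (List.map (fun i => ppl_inline (PySem.List.slice plist (some i) (some (i + n))))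
            (PySem.List.pyRange 0 (plist.length : Int) n)) ++ "]\r\n")
      conv_rhs => rw [hn]
      rw [PySem.List.pyRange_of_pos (a := 0) (b := (plist.length : Int))
        (show (0:Int) < ((n.toNat : Nat) : Int) by omega)]
      rw [if_pos (show (0:Int) < (plist.length : Int) by omega)]
      have hM : ((((plist.length : Int)) - 0 + ((n.toNat : Nat) : Int) - 1) / ((n.toNat : Nat) : Int)).toNat
          = (plist.length + n.toNat - 1) / n.toNat := by
        rw [show ((plist.length : Int) - 0 + ((n.toNat : Nat) : Int) - 1)
            = ((plist.length + n.toNat - 1 : Nat) : Int) by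
          rw [Nat.cast_sub (by omega : 1 ≤ plist.length + n.toNat)]
          push_cast; ring]
        rw [← Int.natCast_div, Int.toNat_natCast]
      rw [hM, List.map_map]
      have hmap : (List.range ((plist.length + n.toNat - 1) / n.toNat)).map
            ((fun i => ppl_inline (PySem.List.slice plist (some i) (some (i + ((n.toNat : Nat) : Int)))))
              ∘ (fun k : Nat => (0 : Int) + ((n.toNat : Nat) : Int) * (k : Int)))
          = (List.range ((plist.length + n.toNat - 1) / n.toNat)).map
            (fun k => ppl_inline ((plist.drop (n.toNat * k)).take n.toNat)) := by
        apply List.map_congr_left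
        intro k _
        simp only [Function.comp]
        rw [show (0 : Int) + ((n.toNat : Nat) : Int) * (k : Int) = ((n.toNat * k : Nat) : Int) by
          push_cast; ring]
        rw [PySem.List.slice_natCast_add]
      rw [hmap, hB]
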